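-- pv_equiv track=rewrite | github.com/skydark/project-euler | 183.py | pe183
-- ===== SOURCE A (Python) =====
-- def pe183(N):
--     k, n1, s = 2, 4, 0  # n1 = (k+1)**(k+1)//k*k
--     kk = k**k
--     while n1 < N:
--         kk2 = (k+1)**(k+1)
--         n2 = kk2//kk
--         kk = kk2
--         if n2 > N:
--             n2 = N
--         t = k
--         while t % 2 == 0:
--             t //= 2
--         while t % 5 == 0:
--             t //= 5
--         for n in range(n1+1, n2+1):
--             if n % t == 0:
--                 s -= n
--             else:
--                 s += n
--         n1 = n2
--         k += 1
--     return s
-- ===== SOURCE B (Python) =====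
-- def pe183(N):
--     s, k, n1 = 0, 2, 4
--     while n1 < N:
--         n2 = min((k + 1) ** (k + 1) // k ** k, N)
--         t = k
--         while t % 2 == 0:
--             t //= 2
--         while t % 5 == 0:
--             t //= 5
--         if n1 < n2:
--             # signed sum over (n1, n2]: plus every n, minus twice the multiples of t
--             total = (n1 + 1 + n2) * (n2 - n1) // 2
--             q1, q2 = n1 // t, n2 // t
--             msum = t * (q1 + 1 + q2) * (q2 - q1) // 2
--             s += total - 2 * msum
--         n1 = n2
--         k += 1
--     return s
-- ===== Notes on version B (the rewrite author's own statement) =====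
-- stated objective: alternative
-- what changed: The inner per-group loop over range(n1+1, n2+1) is replaced by closed-form arithmetic (triangular sum of the group minus twice the sum of multiples of t via floor-division counts), and the carried k**k state is dropped in favour of recomputing powers; the group boundaries are unchanged, so outer-loop bignum powers still dominate for large N.
import Mathlib
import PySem

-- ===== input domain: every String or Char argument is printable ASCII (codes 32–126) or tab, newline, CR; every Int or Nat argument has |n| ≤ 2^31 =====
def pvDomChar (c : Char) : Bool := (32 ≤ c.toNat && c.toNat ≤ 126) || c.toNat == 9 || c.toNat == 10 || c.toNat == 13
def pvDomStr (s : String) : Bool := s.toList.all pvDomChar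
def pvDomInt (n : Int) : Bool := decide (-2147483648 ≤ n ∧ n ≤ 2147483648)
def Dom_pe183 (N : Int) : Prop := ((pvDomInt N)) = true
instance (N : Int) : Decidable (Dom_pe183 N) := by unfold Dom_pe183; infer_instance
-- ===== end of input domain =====

-- B replaces A's inner per-group summation loop by closed-form arithmetic and drops the
-- carried k**k state (objective: alternative; the outer group loop is unchanged).

-- ===== PORT A =====

-- shared helper for the identical `while t % p == 0: t //= p` loops of both Pythons;
-- the fuel guard only makes the loop total (it is never exhausted at the call sites below)
def pvStrip (fuel : ℕ) (p t : Int) : Int :=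
  match fuel with
  | 0 => t
  | f + 1 => if PySem.Int.mod t p == 0 then pvStrip f p (PySem.Int.floordiv t p) else t

-- A's outer while loop; the fuel guard only makes it total: k increases and n1 ≥ k,
-- so the loop body runs fewer than (N-2)+1 times and pe183's fuel is never exhausted
def pe183_loopA (fuel : ℕ) (N k n1 kk s : Int) : Int :=
  match fuel with
  | 0 => s
  | f + 1 =>
    if n1 < N then
      let kk2 := (k + 1) ^ (k + 1).toNat
      let n2 := PySem.Int.floordiv kk2 kk
      let n2c := if n2 > N then N else n2
      let t := pvStrip (k.toNat + 1) 5 (pvStrip (k.toNat + 1) 2 k)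
      let s' := (PySem.List.pyRange (n1 + 1) (n2c + 1) 1).foldl
        (fun s n => if PySem.Int.mod n t == 0 then s - n else s + n) s
      pe183_loopA f N (k + 1) n2c kk2 s'
    else s

def pe183 (N : Int) : Int :=
  pe183_loopA ((N - 2).toNat + 1) N 2 4 4 0

-- ===== PORT B =====

-- B's outer while loop: no carried power state, min() for the clamp,
-- closed-form group contribution instead of the inner for loop (same fuel guard)
def pe183_loopB (fuel : ℕ) (N k n1 s : Int) : Int :=
  match fuel with
  | 0 => s
  | f + 1 =>
    if n1 < N then
      let n2 := min (PySem.Int.floordiv ((k + 1) ^ (k + 1).toNat) (k ^ k.toNat)) N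
      let t := pvStrip (k.toNat + 1) 5 (pvStrip (k.toNat + 1) 2 k)
      let s' :=
        if n1 < n2 then
          let total := PySem.Int.floordiv ((n1 + 1 + n2) * (n2 - n1)) 2
          let q1 := PySem.Int.floordiv n1 t
          let q2 := PySem.Int.floordiv n2 t
          let msum := PySem.Int.floordiv (t * (q1 + 1 + q2) * (q2 - q1)) 2
          s + (total - 2 * msum)
        else s
      pe183_loopB f N (k + 1) n2 s'
    else s

def pe183_alt (N : Int) : Int :=
  pe183_loopB ((N - 2).toNat + 1) N 2 4 0

-- ===== PRECONDITION & SPEC =====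
def Spec_pe183 (N : Int) (out : Int) : Prop := out = pe183_alt N
instance (N : Int) (out : Int) : Decidable (Spec_pe183 N out) := by unfold Spec_pe183; infer_instance

-- ===== CLAIM (what is proved, stated in full; the proofs are below) =====
def Claim_equal_pe183 : Prop := ∀ (N : Int), Dom_pe183 N → Spec_pe183 N (pe183 N)

-- ===== LEMMAS AND PROOFS =====

-- quotient step: ⌊b/t⌋ versus ⌊(b-1)/t⌋
theorem pvStrip_pos (fuel : ℕ) (p t : Int) (hp : 1 < p) (ht : 0 < t) :
    0 < pvStrip fuel p t := by
  induction fuel generalizing t with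
  | zero => exact ht
  | succ f ih =>
    rw [pvStrip]
    split
    · rename_i h
      refine ih _ ?_
      have hd : p ∣ t := (PySem.Int.mod_eq_zero_iff_dvd t p).mp (by simpa using h)
      rw [PySem.Int.floordiv_eq_ediv_of_pos (by omega)]
      have h1 : p ≤ t := Int.le_of_dvd ht hd
      have h2 := (Int.le_ediv_iff_mul_le (show (0:Int) < p by omega)).mpr
        (by omega : 1 * p ≤ t)
      omega
    · exact ht

-- quotient step: floor(b/t) versus floor((b-1)/t)
theorem pvFloordiv_pred (b t : Int) (ht : 0 < t) :
    PySem.Int.floordiv (b - 1) t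
      = PySem.Int.floordiv b t - (if t ∣ b then 1 else 0) := by
  have hmul := PySem.Int.floordiv_mul_add_mod b t
  have hm0 := PySem.Int.mod_nonneg b ht
  have hmlt := PySem.Int.mod_lt b ht
  have hdvd := PySem.Int.mod_eq_zero_iff_dvd b t
  rw [PySem.Int.floordiv_eq_iff_of_pos ht]
  split
  · rename_i hd
    have hr : PySem.Int.mod b t = 0 := hdvd.mpr hd
    constructor <;> nlinarith
  · rename_i hd
    have hr : PySem.Int.mod b t ≠ 0 := fun hc => hd (hdvd.mp hc)
    have hr1 : 1 ≤ PySem.Int.mod b t := by omega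
    constructor <;> nlinarith

-- the signed inner sum of A over (a, a+n] in closed (doubled) form
theorem pvFoldSigned (t : Int) (ht : 0 < t) (n : ℕ) : ∀ (a s : Int),
    2 * ((PySem.List.pyRange (a+1) (a+1+(n:Int)) 1).foldl
          (fun s x => if PySem.Int.mod x t == 0 then s - x else s + x) s)
    = 2*s + (a+1+(a+(n:Int)))*(n:Int)
      - 2*(t*(PySem.Int.floordiv a t + 1 + PySem.Int.floordiv (a+(n:Int)) t)
            *(PySem.Int.floordiv (a+(n:Int)) t - PySem.Int.floordiv a t)) := by
  induction n with
  | zero =>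
    intro a s
    simp [pysem]
  | succ m ih =>
    intro a s
    have hb : a + 1 + ((m:Int)+1) = (a + 1 + (m:Int)) + 1 := by ring
    push_cast
    rw [hb, PySem.List.pyRange_one_succ_right (by omega), List.foldl_append]
    simp only [List.foldl_cons, List.foldl_nil]
    set b : Int := a + ((m:Int)+1) with hbdef
    have hbm : a + 1 + (m:Int) = b := by omega
    have hpred : PySem.Int.floordiv (a + (m:Int)) t
        = PySem.Int.floordiv b t - (if t ∣ b then 1 else 0) := by
      have h1 := pvFloordiv_pred b t ht
      have h2 : b - 1 = a + (m:Int) := by omega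
      rw [h2] at h1
      omega
    rw [hbm]
    have hih := ih a s
    rw [hbm, hpred] at hih
    by_cases hd : t ∣ b
    · have hmz : PySem.Int.mod b t = 0 := (PySem.Int.mod_eq_zero_iff_dvd b t).mpr hd
      have hbq : PySem.Int.floordiv b t * t + 0 = b := by
        rw [← hmz]; exact PySem.Int.floordiv_mul_add_mod b t
      simp only [hmz, BEq.rfl, if_true] at *
      simp only [hd, if_true] at hih
      linear_combination hih + (1-(m:Int))*hbdef + 4*hbq
    · have hmz : (PySem.Int.mod b t == 0) = false := by
        simpa using fun hc => hd ((PySem.Int.mod_eq_zero_iff_dvd b t).mp hc)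
      rw [hmz]
      simp only [if_false, Bool.false_eq_true]
      simp only [hd, if_false] at hih
      linear_combination hih + (1-(m:Int))*hbdef

theorem pvGroup_eq (t : Int) (ht : 0 < t) (n1 n2 s : Int) :
    (PySem.List.pyRange (n1+1) (n2+1) 1).foldl
        (fun s x => if PySem.Int.mod x t == 0 then s - x else s + x) s
    = if n1 < n2 then
        s + (PySem.Int.floordiv ((n1 + 1 + n2) * (n2 - n1)) 2
             - 2 * PySem.Int.floordiv
                 (t * (PySem.Int.floordiv n1 t + 1 + PySem.Int.floordiv n2 t)
                    * (PySem.Int.floordiv n2 t - PySem.Int.floordiv n1 t)) 2)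
      else s := by
  by_cases hlt : n1 < n2
  · simp only [hlt, if_true]
    obtain ⟨n, hn⟩ : ∃ n : ℕ, n2 = n1 + (n : Int) := ⟨(n2 - n1).toNat, by omega⟩
    subst hn
    have key := pvFoldSigned t ht n n1 s
    have hr : n1 + 1 + (n : Int) = (n1 + (n : Int)) + 1 := by ring
    rw [hr] at key
    set q1 := PySem.Int.floordiv n1 t
    set q2 := PySem.Int.floordiv (n1 + (n : Int)) t
    have he1 : 2 ∣ (n1 + 1 + (n1 + (n:Int))) * ((n1 + (n:Int)) - n1) := by
      rcases (show 2 ∣ (n1 + 1 + (n1 + (n:Int))) ∨ 2 ∣ ((n1 + (n:Int)) - n1) by omega) with h | h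
      · exact Dvd.dvd.mul_right h _
      · exact Dvd.dvd.mul_left h _
    have he2 : 2 ∣ t * (q1 + 1 + q2) * (q2 - q1) := by
      rcases (show 2 ∣ (q1 + 1 + q2) ∨ 2 ∣ (q2 - q1) by omega) with h | h
      · exact Dvd.dvd.mul_right (Dvd.dvd.mul_left h t) _
      · exact Dvd.dvd.mul_left h _
    have hf1 : 2 * PySem.Int.floordiv ((n1 + 1 + (n1 + (n:Int))) * ((n1 + (n:Int)) - n1)) 2
        = (n1 + 1 + (n1 + (n:Int))) * ((n1 + (n:Int)) - n1) := by
      rw [PySem.Int.floordiv_eq_ediv_of_pos (by omega)]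
      omega
    have hf2 : 2 * PySem.Int.floordiv (t * (q1 + 1 + q2) * (q2 - q1)) 2
        = t * (q1 + 1 + q2) * (q2 - q1) := by
      rw [PySem.Int.floordiv_eq_ediv_of_pos (by omega)]
      omega
    nlinarith [key, hf1, hf2]
  · have hempty : PySem.List.pyRange (n1+1) (n2+1) 1 = [] := by
      have hle : n2 + 1 ≤ n1 + 1 := by omega
      simp [pysem, hle]
    rw [hempty]
    simp [hlt]

theorem pvLoop_eq (fuel : ℕ) : ∀ (N k n1 kk s : Int), 2 ≤ k → kk = k ^ k.toNat →
    pe183_loopA fuel N k n1 kk s = pe183_loopB fuel N k n1 s := by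
  induction fuel with
  | zero => intro N k n1 kk s hk hkk; rfl
  | succ f ih =>
    intro N k n1 kk s hk hkk
    rw [pe183_loopA, pe183_loopB]
    by_cases hcond : n1 < N
    · rw [if_pos hcond, if_pos hcond]
      subst hkk
      have hmin : (if PySem.Int.floordiv ((k+1) ^ (k+1).toNat) (k ^ k.toNat) > N
            then N else PySem.Int.floordiv ((k+1) ^ (k+1).toNat) (k ^ k.toNat))
          = min (PySem.Int.floordiv ((k+1) ^ (k+1).toNat) (k ^ k.toNat)) N := by
        rw [min_def]
        split <;> split <;> omega
      simp only [hmin]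
      rw [pvGroup_eq _ (pvStrip_pos _ 5 _ (by omega)
            (pvStrip_pos _ 2 k (by omega) (by omega)))]
      exact ih _ _ _ _ _ (by omega) rfl
    · rw [if_neg hcond, if_neg hcond]

-- ===== VERDICT (by name: the statement is the Claim_ definition above) =====
theorem pe183_spec : Claim_equal_pe183 := by
  intro N _
  show pe183 N = pe183_alt N
  exact pvLoop_eq _ N 2 4 4 0 (by omega) (by decide)
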